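-- pv_equiv track=rewrite | github.com/cwinton/RoundRobinScheduler | WeightSolution.py | week_strength
-- ===== SOURCE A (Python) =====
-- def week_strength(week, team):
--     # Defines how much time each team waits per night
--     playcount = [int(team in timeslot) for timeslot in week]
--     playtimes = sum(playcount)
--     if playtimes > 0:
--         firstplay = playcount.index(1)
--         lastplay = len(playcount) -1 - playcount[::-1].index(1)
--         return lastplay - firstplay - playtimes + 1
--     else:
--         return playtimes
-- ===== SOURCE B (Python) =====
-- def week_strength(week, team):
--     # One pass keeping three scalar accumulators instead of building a playcount list.
--     first = None
--     last = 0
--     count = 0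
--     for i, timeslot in enumerate(week):
--         if team in timeslot:
--             if first is None:
--                 first = i
--             last = i
--             count += 1
--     if count > 0:
--         return last - first - count + 1
--     return 0
-- ===== Notes on version B (the rewrite author's own statement) =====
-- stated objective: simpler
-- what changed: Replaced build-a-playcount-list, sum it, then two index scans (one on the reversed list) by a single pass over enumerate(week) maintaining first/last/count scalars.
import Mathlib
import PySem

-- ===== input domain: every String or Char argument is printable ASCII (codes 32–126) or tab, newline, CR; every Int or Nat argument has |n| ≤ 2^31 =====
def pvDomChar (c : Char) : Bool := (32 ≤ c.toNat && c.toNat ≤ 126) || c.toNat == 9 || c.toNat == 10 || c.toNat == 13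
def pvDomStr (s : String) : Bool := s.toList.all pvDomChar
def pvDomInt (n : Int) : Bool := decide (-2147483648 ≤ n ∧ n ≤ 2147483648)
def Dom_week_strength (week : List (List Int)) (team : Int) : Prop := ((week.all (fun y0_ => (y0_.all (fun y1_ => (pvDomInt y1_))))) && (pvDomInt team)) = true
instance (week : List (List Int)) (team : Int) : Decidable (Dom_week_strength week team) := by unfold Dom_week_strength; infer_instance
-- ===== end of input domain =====

-- B replaces A's playcount-list + sum + two index scans by one pass keeping first/last/count scalars (simpler).


-- ===== PORT A =====
-- playcount.index(1) / playcount[::-1].index(1): inside the branch playtimes > 0, so a 1 is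
-- present and Python's .index cannot raise; '.getD 0' is therefore never taken on a 'none'.
-- playcount[::-1] is PySem.List.slice? … (-1) (= some of the reverse), '.getD []' never taken.
def week_strength (week : List (List Int)) (team : Int) : Int :=
  let playcount : List Int := week.map (fun timeslot => if team ∈ timeslot then 1 else 0)
  let playtimes : Int := playcount.sum
  if playtimes > 0 then
    let firstplay : Int := ((PySem.List.index? playcount 1).getD 0 : Nat)
    let lastplay : Int := (playcount.length : Int) - 1 -
      ((PySem.List.index? ((PySem.List.slice? playcount none none (-1)).getD []) 1).getD 0 : Nat)
    lastplay - firstplay - playtimes + 1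
  else playtimes

-- ===== PORT B =====
-- the for-loop over enumerate(week): state = (first : Option Int, last, count), i the index
def wsLoop (team : Int) : List (List Int) → Int → Option Int × Int × Int → Option Int × Int × Int
  | [], _, st => st
  | timeslot :: rest, i, (first, last, count) =>
    if team ∈ timeslot then
      wsLoop team rest (i + 1) ((match first with | none => some i | some x => some x), i, count + 1)
    else
      wsLoop team rest (i + 1) (first, last, count)

def week_strength_alt (week : List (List Int)) (team : Int) : Int :=
  match wsLoop team week 0 (none, 0, 0) with
  | (first, last, count) => if count > 0 then last - first.getD 0 - count + 1 else 0

-- ===== PRECONDITION & SPEC =====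
def Spec_week_strength (week : List (List Int)) (team : Int) (out : Int) : Prop := out = week_strength_alt week team
instance (week : List (List Int)) (team : Int) (out : Int) : Decidable (Spec_week_strength week team out) := by unfold Spec_week_strength; infer_instance

-- ===== CLAIM (what is proved, stated in full; the proofs are below) =====
def Claim_equal_week_strength : Prop := ∀ (week : List (List Int)) (team : Int), Dom_week_strength week team → Spec_week_strength week team (week_strength week team)

-- ===== LEMMAS AND PROOFS =====

-- A's playcount list
def pvPc (team : Int) (week : List (List Int)) : List Int :=
  week.map (fun timeslot => if team ∈ timeslot then 1 else 0)

-- absolute index of the last play, as B's loop maintains it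
def pvLast (team : Int) : List (List Int) → Int → Int → Int
  | [], _, l => l
  | ts :: rest, i, l => pvLast team rest (i + 1) (if team ∈ ts then i else l)

theorem pvPc_sum_nonneg (team : Int) (week : List (List Int)) : 0 ≤ (pvPc team week).sum := by
  induction week with
  | nil => simp [pvPc]
  | cons ts rest ih =>
    simp only [pvPc, List.map_cons, List.sum_cons] at *
    split <;> omega

theorem pvPc_mem_iff (team : Int) (week : List (List Int)) :
    (1 : Int) ∈ pvPc team week ↔ 0 < (pvPc team week).sum := by
  induction week with
  | nil => simp [pvPc]
  | cons ts rest ih =>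
    have h := pvPc_sum_nonneg team rest
    simp only [pvPc, List.map_cons, List.sum_cons, List.mem_cons] at *
    split <;> (simp_all; try omega)

theorem wsLoop_some (team : Int) (week : List (List Int)) :
    ∀ (i f l c : Int), wsLoop team week i (some f, l, c) =
      (some f, pvLast team week i l, c + (pvPc team week).sum) := by
  induction week with
  | nil => intro i f l c; simp [wsLoop, pvLast, pvPc]
  | cons ts rest ih =>
    intro i f l c
    simp only [wsLoop, pvLast, pvPc, List.map_cons, List.sum_cons]
    split <;> (rw [ih]; simp [pvPc]; try ring_nf)

theorem wsLoop_none (team : Int) (week : List (List Int)) :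
    ∀ (i : Int), wsLoop team week i (none, 0, 0) =
      if (1 : Int) ∈ pvPc team week then
        (some (i + ((PySem.List.index? (pvPc team week) 1).getD 0 : Nat)),
         pvLast team week i 0, (pvPc team week).sum)
      else (none, 0, 0) := by
  induction week with
  | nil => intro i; simp [wsLoop, pvPc]
  | cons ts rest ih =>
    intro i
    simp only [wsLoop, pvPc, List.map_cons, pvLast, List.sum_cons]
    by_cases hts : team ∈ ts
    · rw [if_pos hts, wsLoop_some]
      have h1 : PySem.List.index? ((1 : Int) :: pvPc team rest) 1 = some 0 :=
        PySem.List.index?_cons_self 1 (pvPc team rest)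
      rw [show ((1:Int) :: pvPc team rest) = pvPc team (ts :: rest) from by simp [pvPc, hts]] at h1
      simp only [pvPc, List.map_cons, if_pos hts] at h1 ⊢
      simp
      try ring_nf
    · rw [if_neg hts, ih]
      have h0 : PySem.List.index? ((0 : Int) :: pvPc team rest) 1 =
          (PySem.List.index? (pvPc team rest) 1).map (· + 1) :=
        PySem.List.index?_cons_of_ne (pvPc team rest) (by decide)
      by_cases hm : (1 : Int) ∈ pvPc team rest
      · rw [if_pos hm]
        have : (1 : Int) ∈ (0 : Int) :: pvPc team rest := List.mem_cons_of_mem _ hm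
        rw [if_pos (by simpa [pvPc, hts] using this)]
        obtain ⟨k, hk⟩ := Option.isSome_iff_exists.mp ((PySem.List.index?_isSome_iff _ _).mpr hm)
        simp only [pvPc, if_neg hts] at h0 hk ⊢
        rw [h0, hk]
        simp
        ring
      · have hm2 : (1 : Int) ∉ pvPc team (ts :: rest) := by
          simp only [pvPc, List.map_cons, if_neg hts]
          intro h
          rcases List.mem_cons.mp h with h1 | h1
          · exact absurd h1 (by decide)
          · exact hm (by simpa [pvPc] using h1)
        simp only [pvPc, List.map_cons, if_neg hts] at hm2 ⊢
        have hm' : (1 : Int) ∉ List.map (fun timeslot => if team ∈ timeslot then (1:Int) else 0) rest := hm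
        rw [if_neg hm', if_neg hm2]

theorem pvLast_append (team : Int) (week : List (List Int)) (ts : List Int) :
    ∀ (i l : Int), pvLast team (week ++ [ts]) i l =
      if team ∈ ts then i + week.length else pvLast team week i l := by
  induction week with
  | nil => intro i l; simp only [List.nil_append, pvLast, List.length_nil]; split <;> simp [pvLast, pvPc]
  | cons ts' rest ih =>
    intro i l
    simp only [List.cons_append, pvLast, ih, List.length_cons]
    split <;> (push_cast; ring_nf)

theorem pvLast_eq_rev (team : Int) (week : List (List Int)) :
    ∀ (i l : Int), (1 : Int) ∈ pvPc team week →
      pvLast team week i l = i + ((pvPc team week).length : Int) - 1 -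
        ((PySem.List.index? (pvPc team week).reverse 1).getD 0 : Nat) := by
  induction week using List.reverseRecOn with
  | nil => intro i l h; simp [pvPc] at h
  | append_singleton rest ts ih =>
    intro i l hmem
    have hpc : pvPc team (rest ++ [ts]) = pvPc team rest ++ [if team ∈ ts then 1 else 0] := by
      simp [pvPc]
    rw [pvLast_append]
    by_cases hts : team ∈ ts
    · have : (pvPc team (rest ++ [ts])).reverse = (1 : Int) :: (pvPc team rest).reverse := by
        simp [hpc, hts]
      rw [if_pos hts, this, PySem.List.index?_cons_self]
      simp [pvPc]
      try omega
    · have hrev : (pvPc team (rest ++ [ts])).reverse = (0 : Int) :: (pvPc team rest).reverse := by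
        simp [hpc, hts]
      have hm : (1 : Int) ∈ pvPc team rest := by
        have h' : (1:Int) ∈ pvPc team rest ++ [(0:Int)] := by simpa [hpc, hts] using hmem
        rcases List.mem_append.mp h' with h | h
        · exact h
        · simp at h
      have hms : (1 : Int) ∈ (pvPc team rest).reverse := List.mem_reverse.mpr hm
      obtain ⟨k, hk⟩ := Option.isSome_iff_exists.mp ((PySem.List.index?_isSome_iff _ _).mpr hms)
      rw [if_neg hts, hrev, PySem.List.index?_cons_of_ne ((pvPc team rest).reverse) (by decide),
        hk, ih i l hm, hk]
      simp [hpc]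
      ring

-- ===== VERDICT (by name: the statement is the Claim_ definition above) =====
theorem week_strength_spec : Claim_equal_week_strength := by
  intro week team _
  unfold Spec_week_strength week_strength week_strength_alt
  rw [wsLoop_none]
  have hs := PySem.List.slice?_none_none_neg_one (xs := pvPc team week)
  have hnn := pvPc_sum_nonneg team week
  by_cases hm : (1 : Int) ∈ pvPc team week
  · have hpos : 0 < (pvPc team week).sum := (pvPc_mem_iff team week).mp hm
    rw [if_pos hm]
    simp only [pvPc] at *
    rw [if_pos hpos]
    simp only [hs, Option.getD_some]
    rw [pvLast_eq_rev team week 0 0 hm]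
    simp only [pvPc, List.length_map, Option.getD]
    simp [hpos]
    try ring_nf
  · rw [if_neg hm]
    have hz : (pvPc team week).sum = 0 := by
      rcases lt_or_eq_of_le hnn with h | h
      · exact absurd ((pvPc_mem_iff team week).mpr h) hm
      · omega
    simp only [pvPc] at hz
    simp [hz]
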